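-- pv_equiv track=rewrite | github.com/marcepanowyy/AlgorithmsDataStructures | practice/extra/leet_code/dp/min_operations.py | k_increasing
-- ===== SOURCE A (Python) =====
-- from bisect import bisect_right
--
-- def lis(arr):
--
--     longest, res, n = [], [], len(arr)
--
--     for x in arr:
--         if not res or longest[-1] <= x:
--             longest.append(x)
--             res.append(len(longest))
--         else:
--             idx = bisect_right(longest, x)           # bisect right (why? odpal debuggerem przyklad 4 z bisect left), bo moze byc <=
--             longest[idx] = x
--             res.append(idx + 1)
--
--     return n - len(longest)
--
-- def k_increasing(arr, k):
--
--     n, ans  = len(arr), 0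
--     groups = [[] for _ in range(k)]
--
--     for i, num in enumerate(arr):
--         groups[i % k] += [num]
--
--     for group in groups:
--         ans += lis(group)
--
--     return ans
-- ===== SOURCE B (Python) =====
-- def lnds(g):
--     # length of the longest non-decreasing subsequence, quadratic DP
--     seen = []  # (value, length of best non-decreasing subsequence ending at it)
--     best = 0
--     for x in g:
--         d = 1 + max((dj for (v, dj) in seen if v <= x), default=0)
--         seen.append((x, d))
--         best = max(best, d)
--     return best
--
--
-- def k_increasing(arr, k):
--     groups = [[] for _ in range(k)]
--     for i, x in enumerate(arr):
--         groups[i % k].append(x)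
--     return sum(len(g) - lnds(g) for g in groups)
-- ===== Notes on version B (the rewrite author's own statement) =====
-- stated objective: simpler
-- what changed: The patience-sorting LIS (binary-search tails array maintained with bisect_right plus an unused res list) is replaced by a straightforward quadratic dynamic program: for each element the best non-decreasing subsequence length ending there is 1 + max over earlier smaller-or-equal elements, and each group contributes its length minus the maximum dp value.
import Mathlib
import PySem

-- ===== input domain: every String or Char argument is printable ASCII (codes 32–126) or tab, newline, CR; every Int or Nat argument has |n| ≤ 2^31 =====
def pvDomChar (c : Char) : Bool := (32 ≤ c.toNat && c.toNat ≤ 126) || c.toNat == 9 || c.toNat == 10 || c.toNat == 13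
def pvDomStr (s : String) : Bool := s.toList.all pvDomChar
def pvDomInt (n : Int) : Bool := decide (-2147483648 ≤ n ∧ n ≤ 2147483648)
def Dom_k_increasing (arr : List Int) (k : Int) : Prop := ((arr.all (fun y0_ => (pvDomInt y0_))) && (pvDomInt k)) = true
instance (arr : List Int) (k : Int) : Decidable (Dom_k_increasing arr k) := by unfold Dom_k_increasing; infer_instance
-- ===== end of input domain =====

-- B replaces A's patience-sorting LIS (bisect_right tails list) with a plain quadratic
-- DP for the longest non-decreasing subsequence length per group; not faster, just plainer.


-- ===== PORT A =====
-- one step of lis's loop; state = (longest, res).  Python reads longest[-1] only when res is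
-- non-empty, and then longest is non-empty too (both grow together), so getLast?.elim is exact.
def pvLisStep (st : List Int × List Int) (x : Int) : List Int × List Int :=
  if st.2.isEmpty || st.1.getLast?.elim false (fun l => decide (l ≤ x)) then
    (st.1 ++ [x], st.2 ++ [(st.1.length : Int) + 1])
  else
    let idx := PySem.List.bisectRight st.1 x
    (st.1.set idx x, st.2 ++ [(idx : Int) + 1])

def pvLis (arr : List Int) : Int :=
  (arr.length : Int) - ((arr.foldl pvLisStep ([], [])).1.length : Int)

-- groups[i % k] += [num]; under Pre_ (k ≥ 1) the index i % k is always in range, so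
-- List.modify (a no-op out of range, where Python raises) is exact.
def k_increasing (arr : List Int) (k : Int) : Int :=
  let groups0 : List (List Int) := (List.range k.toNat).map (fun _ => ([] : List Int))
  let groups := (PySem.List.enumerate arr).foldl
    (fun gs p => gs.modify (PySem.Int.mod p.1 k).toNat (fun g => g ++ [p.2])) groups0
  groups.foldl (fun ans g => ans + pvLis g) 0

-- ===== PORT B =====
-- one step of lnds's loop; state = (seen, best), seen = list of (value, dp) pairs.
def pvLndsStep (st : List (Int × Int) × Int) (x : Int) : List (Int × Int) × Int :=
  let d := 1 + st.1.foldl (fun m p => if p.1 ≤ x then max m p.2 else m) 0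
  (st.1 ++ [(x, d)], max st.2 d)

def pvLnds (g : List Int) : Int := (g.foldl pvLndsStep ([], 0)).2

def k_increasing_alt (arr : List Int) (k : Int) : Int :=
  let groups := (PySem.List.enumerate arr).foldl
    (fun gs p => gs.modify (PySem.Int.mod p.1 k).toNat (fun g => g.concat p.2))
    ((List.range k.toNat).map (fun _ => ([] : List Int)))
  (groups.map (fun g => (g.length : Int) - pvLnds g)).sum

-- ===== PRECONDITION & SPEC =====
-- A raises on k ≤ 0 with a non-empty arr (ZeroDivisionError for k = 0, IndexError for k < 0);
-- those inputs are excluded.  On arr = [] A returns 0 for every k.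
def Pre_k_increasing (arr : List Int) (k : Int) : Prop := 1 ≤ k ∨ arr = []
instance (arr : List Int) (k : Int) : Decidable (Pre_k_increasing arr k) := by
  unfold Pre_k_increasing; infer_instance

def pvWitness_k_increasing : List Int × Int := ([4, 1, 2, 3, 1], 2)

def Spec_k_increasing (arr : List Int) (k : Int) (out : Int) : Prop := out = k_increasing_alt arr k
instance (arr : List Int) (k : Int) (out : Int) : Decidable (Spec_k_increasing arr k out) := by
  unfold Spec_k_increasing; infer_instance

-- ===== CLAIM (what is proved, stated in full; the proofs are below) =====
def Claim_equal_k_increasing : Prop := ∀ (arr : List Int) (k : Int), Dom_k_increasing arr k → Pre_k_increasing arr k → Spec_k_increasing arr k (k_increasing arr k)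

-- ===== LEMMAS AND PROOFS =====

-- the inner max of B's dp step, with a general accumulator
def pvMaxFold (seen : List (Int × Int)) (x : Int) (a : Int) : Int :=
  seen.foldl (fun m p => if p.1 ≤ x then max m p.2 else m) a

lemma pvMaxFold_ge (seen : List (Int × Int)) (x a : Int) : a ≤ pvMaxFold seen x a := by
  induction seen generalizing a with
  | nil => simp [pvMaxFold]
  | cons p t ih =>
    simp only [pvMaxFold, List.foldl_cons]
    by_cases hpx : p.1 ≤ x
    · rw [if_pos hpx]
      exact le_trans (le_max_left a p.2) (ih (max a p.2))
    · rw [if_neg hpx]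
      exact ih a

lemma pvMaxFold_mem (seen : List (Int × Int)) (x a : Int) :
    ∀ p ∈ seen, p.1 ≤ x → p.2 ≤ pvMaxFold seen x a := by
  induction seen generalizing a with
  | nil => simp
  | cons q t ih =>
    intro p hp hpx
    rw [List.mem_cons] at hp
    simp only [pvMaxFold, List.foldl_cons]
    rcases hp with hp | hp
    · subst hp
      rw [if_pos hpx]
      exact le_trans (le_max_right a p.2) (pvMaxFold_ge t x _)
    · by_cases hqx : q.1 ≤ x
      · rw [if_pos hqx]; exact ih _ p hp hpx
      · rw [if_neg hqx]; exact ih _ p hp hpx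

lemma pvMaxFold_cases (seen : List (Int × Int)) (x a : Int) :
    pvMaxFold seen x a = a ∨ ∃ p ∈ seen, p.1 ≤ x ∧ p.2 = pvMaxFold seen x a := by
  induction seen generalizing a with
  | nil => left; simp [pvMaxFold]
  | cons q t ih =>
    simp only [pvMaxFold, List.foldl_cons]
    by_cases hqx : q.1 ≤ x
    · rw [if_pos hqx]
      show pvMaxFold t x (max a q.2) = a ∨ ∃ p ∈ q :: t, p.1 ≤ x ∧ p.2 = pvMaxFold t x (max a q.2)
      rcases ih (max a q.2) with h | ⟨p, hp, hpx, hpe⟩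
      · by_cases hq : q.2 ≤ a
        · left; rw [h, max_eq_left hq]
        · right
          exact ⟨q, List.mem_cons_self, hqx, by rw [h, max_eq_right (by omega)]⟩
      · right; exact ⟨p, List.mem_cons_of_mem _ hp, hpx, hpe⟩
    · rw [if_neg hqx]
      show pvMaxFold t x a = a ∨ ∃ p ∈ q :: t, p.1 ≤ x ∧ p.2 = pvMaxFold t x a
      rcases ih a with h | ⟨p, hp, hpx, hpe⟩
      · left; exact h
      · right; exact ⟨p, List.mem_cons_of_mem _ hp, hpx, hpe⟩

-- the bisimulation invariant between A's patience state (t = longest, res) and B's dp state (seen, best)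
def pvInv (seen : List (Int × Int)) (best : Int) (t : List Int) (res : List Int) : Prop :=
  (res = [] ↔ t = []) ∧
  t.Pairwise (· ≤ ·) ∧
  best = (t.length : Int) ∧
  (∀ p ∈ seen, 1 ≤ p.2 ∧ p.2 ≤ (t.length : Int)) ∧
  (∀ (j : Nat) (hj : j < t.length),
    (∃ p ∈ seen, p.2 = (j : Int) + 1 ∧ p.1 = t[j]) ∧
    (∀ p ∈ seen, p.2 = (j : Int) + 1 → t[j] ≤ p.1))

-- bisect_right on the tails list = B's max dp value over elements ≤ x
lemma pv_br_eq_max (seen : List (Int × Int)) (best : Int) (t : List Int) (res : List Int)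
    (x : Int) (h : pvInv seen best t res) :
    (PySem.List.bisectRight t x : Int) = pvMaxFold seen x 0 := by
  obtain ⟨-, hsort, -, h4, h5⟩ := h
  obtain ⟨hle, hlt, hgt⟩ := PySem.List.bisectRight_spec t x hsort
  set br := PySem.List.bisectRight t x with hbr
  apply le_antisymm
  · rcases Nat.eq_zero_or_pos br with h0 | h0
    · rw [h0]; exact_mod_cast pvMaxFold_ge seen x 0
    · have hj : br - 1 < t.length := by omega
      have htx : t[br - 1] ≤ x := hlt (br - 1) hj (by omega)
      obtain ⟨p, hp, hpd, hpv⟩ := (h5 (br - 1) hj).1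
      have h2 := pvMaxFold_mem seen x 0 p hp (by rw [hpv]; exact htx)
      rw [hpd] at h2
      omega
  · rcases pvMaxFold_cases seen x 0 with h0 | ⟨p, hp, hpx, hpe⟩
    · rw [h0]; exact_mod_cast Nat.zero_le br
    · obtain ⟨hp1, hp2⟩ := h4 p hp
      set M := pvMaxFold seen x 0 with hM
      have hjlt : M.toNat - 1 < t.length := by omega
      have hmin := (h5 (M.toNat - 1) hjlt).2 p hp (by omega)
      by_contra hcon
      have hbrle : br ≤ M.toNat - 1 := by omega
      have := hgt (M.toNat - 1) hjlt hbrle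
      omega

-- A's branch condition holds exactly when bisect_right would return len(longest)
lemma pv_cond_iff (seen : List (Int × Int)) (best : Int) (t : List Int) (res : List Int)
    (x : Int) (h : pvInv seen best t res) :
    ((res.isEmpty || t.getLast?.elim false (fun l => decide (l ≤ x))) = true) ↔
      PySem.List.bisectRight t x = t.length := by
  obtain ⟨h1, hsort, -, -, -⟩ := h
  obtain ⟨hle, hlt, hgt⟩ := PySem.List.bisectRight_spec t x hsort
  by_cases htne : t = []
  · subst htne
    simp [h1.mpr rfl, PySem.List.bisectRight, PySem.List.bisectRightLoop]
  · have hpos : 0 < t.length := List.length_pos_iff.mpr htne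
    have hres : res.isEmpty = false := by
      rcases res with _ | _
      · exact absurd (h1.mp rfl) htne
      · rfl
    have hlast : t.getLast? = some (t[t.length - 1]'(by omega)) := by
      rw [List.getLast?_eq_getElem?, List.getElem?_eq_getElem (by omega)]
    rw [hres, hlast]
    simp only [Bool.false_or, Option.elim_some, decide_eq_true_eq]
    constructor
    · intro hlx
      by_contra hcon
      have hbrlt : PySem.List.bisectRight t x < t.length := by omega
      have hx := hgt (PySem.List.bisectRight t x) hbrlt le_rfl
      have hmono : t[PySem.List.bisectRight t x] ≤ t[t.length - 1]'(by omega) := by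
        rcases Nat.lt_or_ge (PySem.List.bisectRight t x) (t.length - 1) with hlt2 | hge
        · exact List.pairwise_iff_getElem.mp hsort _ _ hbrlt (by omega) hlt2
        · have : PySem.List.bisectRight t x = t.length - 1 := by omega
          simp_rw [this]
          omega
      omega
    · intro hbr
      exact hlt (t.length - 1) (by omega) (by omega)

-- one loop step preserves the invariant
lemma pvInv_step (seen : List (Int × Int)) (best : Int) (t : List Int) (res : List Int)
    (x : Int) (h : pvInv seen best t res) :
    pvInv (pvLndsStep (seen, best) x).1 (pvLndsStep (seen, best) x).2
          (pvLisStep (t, res) x).1 (pvLisStep (t, res) x).2 := by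
  have hbrM := pv_br_eq_max seen best t res x h
  have hcond := pv_cond_iff seen best t res x h
  obtain ⟨h1, hsort, h3, h4, h5⟩ := h
  obtain ⟨hle, hlt, hgt⟩ := PySem.List.bisectRight_spec t x hsort
  set br := PySem.List.bisectRight t x with hbrdef
  have hM0 : 0 ≤ pvMaxFold seen x 0 := pvMaxFold_ge seen x 0
  have hMeq : List.foldl (fun m p => if p.1 ≤ x then max m p.2 else m) 0 seen
      = pvMaxFold seen x 0 := rfl
  simp only [pvLndsStep, hMeq]
  set M := pvMaxFold seen x 0 with hMdef
  by_cases hc : br = t.length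
  · -- append branch: bisect_right = len, so longest[-1] <= x (or empty); dp value is len+1
    have hMlen : M = (t.length : Int) := by omega
    simp only [pvLisStep, if_pos (hcond.mpr hc)]
    refine ⟨by simp, ?_, ?_, ?_, ?_⟩
    · rw [List.pairwise_append]
      refine ⟨hsort, List.pairwise_singleton _ _, ?_⟩
      intro a ha b hb
      rw [List.mem_singleton] at hb
      subst hb
      obtain ⟨j, hj, hja⟩ := List.mem_iff_getElem.mp ha
      rw [← hja]; exact hlt j hj (by omega)
    · simp only [List.length_append, List.length_singleton, h3]
      push_cast
      omega
    · intro p hp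
      rw [List.mem_append, List.mem_singleton] at hp
      simp only [List.length_append, List.length_singleton]
      rcases hp with hp | hp
      · obtain ⟨hp1, hp2⟩ := h4 p hp
        push_cast; omega
      · subst hp
        push_cast
        omega
    · intro j hj
      simp only [List.length_append, List.length_singleton] at hj
      by_cases hjl : j < t.length
      · have hget : (t ++ [x])[j]'(by simp; omega) = t[j] := List.getElem_append_left hjl
        refine ⟨?_, ?_⟩
        · obtain ⟨p, hp, hpd, hpv⟩ := (h5 j hjl).1
          exact ⟨p, List.mem_append_left _ hp, hpd, by rw [hget]; exact hpv⟩
        · intro p hp hpd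
          rw [List.mem_append, List.mem_singleton] at hp
          rcases hp with hp | hp
          · rw [hget]; exact (h5 j hjl).2 p hp hpd
          · subst hp
            dsimp only at hpd
            omega
      · have hje : j = t.length := by omega
        subst hje
        have hget : (t ++ [x])[t.length]'(by simp) = x := by
          rw [List.getElem_append_right (le_refl t.length)]
          simp
        refine ⟨⟨(x, 1 + M), List.mem_append_right _ (List.mem_singleton_self _),
            by dsimp only; omega, by rw [hget]⟩, ?_⟩
        intro p hp hpd
        rw [List.mem_append, List.mem_singleton] at hp
        rcases hp with hp | hp
        · obtain ⟨hp1, hp2⟩ := h4 p hp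
          omega
        · subst hp
          rw [hget]
  · -- overwrite branch: longest[idx] = x with idx = bisect_right; dp value is idx+1
    have hbrlt : br < t.length := by omega
    have hxbr : x < t[br] := hgt br hbrlt le_rfl
    simp only [pvLisStep, if_neg (fun hcc => hc (hcond.mp hcc))]
    refine ⟨?_, ?_, ?_, ?_, ?_⟩
    · constructor
      · intro hh; exact absurd hh (by simp)
      · intro hh
        have hl := congrArg List.length hh
        simp only [List.length_set, List.length_nil] at hl
        omega
    · rw [List.pairwise_iff_getElem]
      intro i j hi hj hij
      simp only [List.length_set] at hi hj
      rw [List.getElem_set, List.getElem_set]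
      by_cases hib : br = i
      · rw [if_pos hib]
        have hjb : ¬ br = j := by omega
        rw [if_neg hjb]
        have hbj : t[br] ≤ t[j] := by
          rcases Nat.lt_or_ge br j with hl | hg
          · exact List.pairwise_iff_getElem.mp hsort _ _ hbrlt hj hl
          · omega
        omega
      · rw [if_neg hib]
        by_cases hjb : br = j
        · rw [if_pos hjb]
          exact hlt i hi (by omega)
        · rw [if_neg hjb]
          exact List.pairwise_iff_getElem.mp hsort i j hi hj hij
    · simp only [List.length_set, h3]
      omega
    · intro p hp
      rw [List.mem_append, List.mem_singleton] at hp
      simp only [List.length_set]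
      rcases hp with hp | hp
      · obtain ⟨hp1, hp2⟩ := h4 p hp
        omega
      · subst hp
        simp only
        omega
    · intro j hj
      simp only [List.length_set] at hj
      by_cases hjb : j = br
      · have hget : (t.set br x)[j]'(by simp only [List.length_set]; omega) = x := by
          subst hjb; exact List.getElem_set_self ..
        refine ⟨⟨(x, 1 + M), List.mem_append_right _ (List.mem_singleton_self _),
            by dsimp only; omega, by rw [hget]⟩, ?_⟩
        intro p hp hpd
        rw [List.mem_append, List.mem_singleton] at hp
        rcases hp with hp | hp
        · have hmin := (h5 br hbrlt).2 p hp (by omega)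
          rw [hget]; omega
        · subst hp
          rw [hget]
      · have hget : (t.set br x)[j]'(by simp only [List.length_set]; omega) = t[j] := List.getElem_set_ne (by omega) ..
        refine ⟨?_, ?_⟩
        · obtain ⟨p, hp, hpd, hpv⟩ := (h5 j hj).1
          exact ⟨p, List.mem_append_left _ hp, hpd, by rw [hget]; exact hpv⟩
        · intro p hp hpd
          rw [List.mem_append, List.mem_singleton] at hp
          rcases hp with hp | hp
          · rw [hget]; exact (h5 j hj).2 p hp hpd
          · subst hp
            dsimp only at hpd
            omega

lemma pvInv_fold (g : List Int) :
    ∀ (seen : List (Int × Int)) (best : Int) (t : List Int) (res : List Int),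
    pvInv seen best t res →
    pvInv (g.foldl pvLndsStep (seen, best)).1 (g.foldl pvLndsStep (seen, best)).2
          (g.foldl pvLisStep (t, res)).1 (g.foldl pvLisStep (t, res)).2 := by
  induction g with
  | nil => intro seen best t res h; exact h
  | cons x g ih =>
    intro seen best t res h
    have hstep := pvInv_step seen best t res x h
    simp only [List.foldl_cons]
    rw [(rfl : pvLndsStep (seen, best) x = ((pvLndsStep (seen, best) x).1, (pvLndsStep (seen, best) x).2)),
        (rfl : pvLisStep (t, res) x = ((pvLisStep (t, res) x).1, (pvLisStep (t, res) x).2))]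
    exact ih _ _ _ _ hstep

-- per group: A's patience count of deletions = length minus B's dp maximum
lemma pvLis_eq_lnds (g : List Int) : pvLis g = (g.length : Int) - pvLnds g := by
  have h := pvInv_fold g [] 0 [] [] ⟨by simp, by simp, by simp, by simp, by simp⟩
  obtain ⟨-, -, h3, -, -⟩ := h
  simp only [pvLis, pvLnds]
  rw [← h3]

-- ===== VERDICT (by name: the statement is the Claim_ definition above) =====
theorem k_increasing_spec : Claim_equal_k_increasing := by
  intro arr k _ _
  unfold Spec_k_increasing k_increasing k_increasing_alt
  have hfun : (fun (gs : List (List Int)) (p : Int × Int) =>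
      gs.modify (PySem.Int.mod p.1 k).toNat (fun g => g.concat p.2)) =
      (fun gs p => gs.modify (PySem.Int.mod p.1 k).toNat (fun g => g ++ [p.2])) := by
    funext gs p
    simp [List.concat_eq_append]
  rw [hfun, PySem.List.foldl_add, Int.zero_add]
  congr 1
  apply List.map_congr_left
  intro g _
  exact pvLis_eq_lnds g
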